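-- pv_equiv track=rewrite | github.com/Mathdis35136/emploi-du-temps-lodima | app.py | attribuer_cours
-- ===== SOURCE A (Python) =====
-- from collections import defaultdict
--
-- def attribuer_cours(cours, dispos, heures_init):
--     heures_restantes = {prof: heures_init[prof].copy() for prof in heures_init}
--     affectations = defaultdict(list)
--
--     for date, moment, classe, feuille, row, col in cours:
--         candidats = []
--         for prof in dispos:
--             if moment in dispos[prof].get(date, set()) and classe in heures_restantes[prof]:
--                 if heures_restantes[prof][classe] >= 4:
--                     candidats.append((prof, heures_restantes[prof][classe]))
--         if not candidats:
--             continue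
--         candidats.sort(key=lambda x: x[1])
--         choisi = candidats[0][0]
--         affectations[choisi].append((date, moment, classe, feuille, row, col))
--         heures_restantes[choisi][classe] -= 4
--         dispos[choisi][date].discard(moment)
--     return affectations
-- ===== SOURCE B (Python) =====
-- from collections import defaultdict
--
-- # B: index teachers once by (date, moment) slot, then pick per course by a single
-- # linear min-scan over the teachers actually available at that slot (no per-course
-- # scan of all teachers, no sort). Note: A mutates `dispos` in place; B leaves it
-- # intact and maintains its own slot index (same return value).
-- def attribuer_cours(cours, dispos, heures_init):
--     heures_restantes = {prof: classes.copy() for prof, classes in heures_init.items()}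
--
--     slot_profs = {}
--     for prof, jours in dispos.items():
--         for date, moments in jours.items():
--             for m in moments:
--                 slot_profs.setdefault((date, m), []).append(prof)
--
--     affectations = defaultdict(list)
--     for date, moment, classe, feuille, row, col in cours:
--         bucket = slot_profs.get((date, moment), [])
--         best = None
--         for prof in bucket:
--             h = heures_restantes[prof].get(classe, 0)
--             if h >= 4 and (best is None or h < best[1]):
--                 best = (prof, h)
--         if best is None:
--             continue
--         choisi, h = best
--         affectations[choisi].append((date, moment, classe, feuille, row, col))
--         heures_restantes[choisi][classe] = h - 4
--         bucket.remove(choisi)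
--     return affectations
-- ===== Notes on version B (the rewrite author's own statement) =====
-- stated objective: faster
-- what changed: B builds a (date,moment)->teachers index once and, per course, does a single linear min-scan over only the teachers available at that slot, instead of A's per-course scan of every teacher followed by a sort of the candidate list; B leaves `dispos` unmutated (A discards moments from it in place) - the return value is identical.
import Mathlib
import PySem

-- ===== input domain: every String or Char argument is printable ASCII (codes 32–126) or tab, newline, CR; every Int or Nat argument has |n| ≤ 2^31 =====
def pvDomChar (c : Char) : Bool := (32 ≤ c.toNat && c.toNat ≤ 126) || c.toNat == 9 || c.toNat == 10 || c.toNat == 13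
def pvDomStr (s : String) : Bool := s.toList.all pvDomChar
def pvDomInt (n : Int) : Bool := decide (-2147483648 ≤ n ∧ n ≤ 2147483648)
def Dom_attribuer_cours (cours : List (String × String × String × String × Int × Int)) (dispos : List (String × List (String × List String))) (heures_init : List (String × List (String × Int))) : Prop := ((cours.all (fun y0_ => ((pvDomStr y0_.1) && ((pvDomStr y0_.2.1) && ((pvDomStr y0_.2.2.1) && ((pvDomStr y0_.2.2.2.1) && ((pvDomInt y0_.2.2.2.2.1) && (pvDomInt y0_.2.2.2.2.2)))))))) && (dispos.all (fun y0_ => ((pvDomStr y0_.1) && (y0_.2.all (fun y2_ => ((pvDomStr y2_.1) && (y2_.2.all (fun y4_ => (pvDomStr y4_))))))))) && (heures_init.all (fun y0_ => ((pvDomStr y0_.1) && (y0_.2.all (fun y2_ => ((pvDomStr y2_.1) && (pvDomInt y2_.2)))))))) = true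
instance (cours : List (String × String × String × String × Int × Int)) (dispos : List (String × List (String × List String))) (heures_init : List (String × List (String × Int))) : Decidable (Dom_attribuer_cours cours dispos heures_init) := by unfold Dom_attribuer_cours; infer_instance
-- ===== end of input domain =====

-- B replaces A's per-course scan of ALL teachers plus a sort by a (date,moment)→teachers
-- index built once and a single linear min-scan of the teachers available at that slot.
-- (Python A mutates `dispos` in place; Python B leaves it intact — the claim is about the
-- return value only.)

abbrev PvCourse := String × String × String × String × Int × Int
abbrev PvHR := PySem.Dict String (PySem.Dict String Int)
abbrev PvDP := PySem.Dict String (PySem.Dict String (PySem.Set String))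
abbrev PvAff := PySem.Dict String (List PvCourse)
abbrev PvIdx := PySem.Dict (String × String) (List String)

-- ===== PORT A =====

-- heures_restantes = {prof: heures_init[prof].copy() for prof in heures_init}  (shared first line of both Pythons)
def pvInitHR (heures_init : List (String × List (String × Int))) : PvHR :=
  PySem.Dict.mk (heures_init.map (fun pc => (pc.1, PySem.Dict.mk pc.2)))

-- the inner `for prof in dispos: …` candidate loop of A
def pvCandidats (hr : PvHR) (dp : PvDP) (date moment classe : String) : List (String × Int) :=
  dp.items.foldl (fun acc pd =>
    if PySem.Set.contains (PySem.Dict.getD pd.2 date PySem.Set.empty) moment then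
      match PySem.Dict.get? (PySem.Dict.getD hr pd.1 (PySem.Dict.mk [])) classe with
      | some h => if 4 ≤ h then acc ++ [(pd.1, h)] else acc
      | none => acc
    else acc) []

-- one iteration of A's `for date, moment, classe, feuille, row, col in cours:` loop
def pvStepA (st : PvDP × PvHR × PvAff) (c : PvCourse) : PvDP × PvHR × PvAff :=
  match PySem.List.sorted (pvCandidats st.2.1 st.1 c.1 c.2.1 c.2.2.1) (fun x => x.2) false with
  | [] => st
  | (choisi, _) :: _ =>
    (st.1.modify choisi (PySem.Dict.mk []) (fun dd => dd.modify c.1 PySem.Set.empty (fun s => PySem.Set.discard s c.2.1)),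
     st.2.1.modify choisi (PySem.Dict.mk []) (fun m => m.modify c.2.2.1 0 (fun h => h - 4)),
     st.2.2.modify choisi [] (fun l => l ++ [c]))

def attribuer_cours (cours : List (String × String × String × String × Int × Int)) (dispos : List (String × List (String × List String))) (heures_init : List (String × List (String × Int))) : List (String × List (String × String × String × String × Int × Int)) :=
  (cours.foldl pvStepA
    (PySem.Dict.mk (dispos.map (fun pd => (pd.1, PySem.Dict.mk pd.2))),
     pvInitHR heures_init,
     PySem.Dict.mk [])).2.2.items

-- ===== PORT B =====

-- slot_profs: for prof, jours in dispos.items(): for date, moments in jours.items(): for m in moments: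
--   slot_profs.setdefault((date, m), []).append(prof)   — setdefault+append ported as insert of (getD ++ [prof])
def pvBuildIdx (dispos : List (String × List (String × List String))) : PvIdx :=
  dispos.foldl (fun idx pd =>
    pd.2.foldl (fun idx dm =>
      dm.2.foldl (fun idx m =>
        idx.insert (dm.1, m) (PySem.Dict.getD idx (dm.1, m) [] ++ [pd.1])) idx) idx) (PySem.Dict.mk [])

-- B's single-pass min-scan of one slot bucket
def pvBest (hr : PvHR) (bucket : List String) (classe : String) : Option (String × Int) :=
  bucket.foldl (fun best prof =>
    let h := PySem.Dict.getD (PySem.Dict.getD hr prof (PySem.Dict.mk [])) classe 0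
    if 4 ≤ h then
      match best with
      | none => some (prof, h)
      | some b => if h < b.2 then some (prof, h) else best
    else best) none

-- one iteration of B's course loop (bucket.remove(choisi) ported as insert of bucket.erase)
def pvStepB (st : PvIdx × PvHR × PvAff) (c : PvCourse) : PvIdx × PvHR × PvAff :=
  let bucket := PySem.Dict.getD st.1 (c.1, c.2.1) []
  match pvBest st.2.1 bucket c.2.2.1 with
  | none => st
  | some (choisi, h) =>
    (st.1.insert (c.1, c.2.1) (bucket.erase choisi),
     st.2.1.modify choisi (PySem.Dict.mk []) (fun m => m.insert c.2.2.1 (h - 4)),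
     st.2.2.modify choisi [] (fun l => l ++ [c]))

def attribuer_cours_alt (cours : List (String × String × String × String × Int × Int)) (dispos : List (String × List (String × List String))) (heures_init : List (String × List (String × Int))) : List (String × List (String × String × String × String × Int × Int)) :=
  (cours.foldl pvStepB
    (pvBuildIdx dispos,
     pvInitHR heures_init,
     PySem.Dict.mk [])).2.2.items

-- ===== PRECONDITION & SPEC =====
-- Pre_ (i) requires the association lists that encode Python dicts/sets to have distinct
-- keys/elements (anything else does not encode a dict/set), and (ii) excludes exactly the
-- inputs where Python A raises KeyError: a teacher listed in dispos but absent from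
-- heures_init who is available at the (date, moment) slot of some course (such a teacher is
-- never chosen, so his availability never shrinks and the raise is a closed-form condition).
def Pre_attribuer_cours (cours : List (String × String × String × String × Int × Int)) (dispos : List (String × List (String × List String))) (heures_init : List (String × List (String × Int))) : Prop :=
  (dispos.map Prod.fst).Nodup ∧
  (∀ pd ∈ dispos, (pd.2.map Prod.fst).Nodup ∧ ∀ dm ∈ pd.2, dm.2.Nodup) ∧
  (∀ pd ∈ dispos, pd.1 ∉ heures_init.map Prod.fst →
     ∀ c ∈ cours, ∀ dm ∈ pd.2, dm.1 = c.1 → c.2.1 ∉ dm.2)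
instance (cours : List (String × String × String × String × Int × Int)) (dispos : List (String × List (String × List String))) (heures_init : List (String × List (String × Int))) : Decidable (Pre_attribuer_cours cours dispos heures_init) := by unfold Pre_attribuer_cours; infer_instance

def pvWitness_attribuer_cours : (List (String × String × String × String × Int × Int)) × (List (String × List (String × List String))) × (List (String × List (String × Int))) :=
  ([("d1", "matin", "6A", "feuille", 2, 3), ("d1", "matin", "6A", "feuille", 4, 5)],
   [("alice", [("d1", ["matin", "soir"])]), ("bob", [("d1", ["matin"])])],
   [("alice", [("6A", 8)]), ("bob", [("6A", 6)])])

def Spec_attribuer_cours (cours : List (String × String × String × String × Int × Int)) (dispos : List (String × List (String × List String))) (heures_init : List (String × List (String × Int))) (out : List (String × List (String × String × String × String × Int × Int))) : Prop := out = attribuer_cours_alt cours dispos heures_init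
instance (cours : List (String × String × String × String × Int × Int)) (dispos : List (String × List (String × List String))) (heures_init : List (String × List (String × Int))) (out : List (String × List (String × String × String × String × Int × Int))) : Decidable (Spec_attribuer_cours cours dispos heures_init out) := by
  unfold Spec_attribuer_cours
  letI h1 : DecidableEq (String × String × String × String × Int × Int) := inferInstance
  letI h2 : DecidableEq (List (String × String × String × String × Int × Int)) := @instDecidableEqList _ h1
  letI h3 : DecidableEq (String × List (String × String × String × String × Int × Int)) := @instDecidableEqProd _ _ _ h2
  exact @instDecidableEqList _ h3 out (attribuer_cours_alt cours dispos heures_init)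

-- ===== CLAIM (what is proved, stated in full; the proofs are below) =====
def Claim_equal_attribuer_cours : Prop := ∀ (cours : List (String × String × String × String × Int × Int)) (dispos : List (String × List (String × List String))) (heures_init : List (String × List (String × Int))), Dom_attribuer_cours cours dispos heures_init → Pre_attribuer_cours cours dispos heures_init → Spec_attribuer_cours cours dispos heures_init (attribuer_cours cours dispos heures_init)

-- ===== LEMMAS AND PROOFS =====

-- availability test of one dispos entry at slot (d, m)
def pvCondP (d m : String) (pd : String × PySem.Dict String (PySem.Set String)) : Bool :=
  PySem.Set.contains (PySem.Dict.getD pd.2 d PySem.Set.empty) m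

-- teachers available at slot (d, m), in dict order (list-level and Dict-level forms)
def pvAvailL (items : List (String × PySem.Dict String (PySem.Set String))) (d m : String) : List String :=
  (items.filter (pvCondP d m)).map Prod.fst

def pvAvail (dp : PvDP) (d m : String) : List String := pvAvailL dp.items d m

-- eligibility of one teacher for a class
def pvElig (hr : PvHR) (classe : String) (p : String) : Option (String × Int) :=
  if 4 ≤ PySem.Dict.getD (PySem.Dict.getD hr p (PySem.Dict.mk [])) classe 0 then
    some (p, PySem.Dict.getD (PySem.Dict.getD hr p (PySem.Dict.mk [])) classe 0)
  else none

-- first element with minimal second component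
def pvFMStep (b : Option (String × Int)) (x : String × Int) : Option (String × Int) :=
  match b with | none => some x | some y => if x.2 < y.2 then some x else b

def pvFirstMin (l : List (String × Int)) : Option (String × Int) := l.foldl pvFMStep none

theorem pv_elig_eq_some (hr : PvHR) (cl p : String) (x : String × Int)
    (h : pvElig hr cl p = some x) :
    x = (p, PySem.Dict.getD (PySem.Dict.getD hr p (PySem.Dict.mk [])) cl 0) := by
  unfold pvElig at h
  split at h
  · exact (Option.some_inj.mp h).symm
  · exact absurd h (by simp)

theorem pv_cand_aux (hr : PvHR) (d m cl : String)
    (items : List (String × PySem.Dict String (PySem.Set String))) :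
    ∀ acc : List (String × Int),
    items.foldl (fun acc pd =>
      if PySem.Set.contains (PySem.Dict.getD pd.2 d PySem.Set.empty) m then
        match PySem.Dict.get? (PySem.Dict.getD hr pd.1 (PySem.Dict.mk [])) cl with
        | some h => if 4 ≤ h then acc ++ [(pd.1, h)] else acc
        | none => acc
      else acc) acc
    = acc ++ (pvAvailL items d m).filterMap (pvElig hr cl) := by
  induction items with
  | nil => intro acc; simp [pvAvailL]
  | cons pd t ih =>
    intro acc
    rw [List.foldl_cons]
    by_cases hq : m ∈ PySem.Dict.getD pd.2 d PySem.Set.empty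
    case pos =>
      have hqc : PySem.Set.contains (PySem.Dict.getD pd.2 d PySem.Set.empty) m = true := by
        simpa [PySem.Set.contains] using hq
      have hfi : pvAvailL (pd :: t) d m = pd.1 :: pvAvailL t d m := by
        simp only [pvAvailL, List.filter_cons, pvCondP, hqc, if_true, List.map_cons]
      rw [hfi]
      cases hg : PySem.Dict.get? (PySem.Dict.getD hr pd.1 (PySem.Dict.mk [])) cl with
      | none =>
        have he : pvElig hr cl pd.1 = none := by
          unfold pvElig
          rw [PySem.Dict.getD_eq_get?_getD, hg]
          simp
        simp only [hqc, if_true, ih, List.filterMap_cons, he]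
      | some h =>
        have hD : PySem.Dict.getD (PySem.Dict.getD hr pd.1 (PySem.Dict.mk [])) cl 0 = h := by
          rw [PySem.Dict.getD_eq_get?_getD, hg]; rfl
        by_cases h4 : 4 ≤ h
        · have he : pvElig hr cl pd.1 = some (pd.1, h) := by
            unfold pvElig; rw [hD]; simp [h4]
          simp only [hqc, if_true, h4, ih, List.filterMap_cons, he, List.append_assoc,
            List.singleton_append]
        · have he : pvElig hr cl pd.1 = none := by
            unfold pvElig; rw [hD]; simp [h4]
          simp only [hqc, if_true, h4, if_false, ih, List.filterMap_cons, he]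
    case neg =>
      have hqc : PySem.Set.contains (PySem.Dict.getD pd.2 d PySem.Set.empty) m = false := by
        simpa [PySem.Set.contains] using hq
      have hfi : pvAvailL (pd :: t) d m = pvAvailL t d m := by
        simp only [pvAvailL, List.filter_cons, pvCondP, hqc, Bool.false_eq_true, if_false]
      simp only [hqc, Bool.false_eq_true, if_false, ih, hfi]

theorem pv_cand_eq (hr : PvHR) (dp : PvDP) (d m cl : String) :
    pvCandidats hr dp d m cl = (pvAvail dp d m).filterMap (pvElig hr cl) := by
  unfold pvCandidats pvAvail
  simpa using pv_cand_aux hr d m cl dp.items []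

theorem pv_best_aux (hr : PvHR) (cl : String) (bucket : List String) :
    ∀ b : Option (String × Int),
    bucket.foldl (fun best prof =>
      let h := PySem.Dict.getD (PySem.Dict.getD hr prof (PySem.Dict.mk [])) cl 0
      if 4 ≤ h then
        match best with
        | none => some (prof, h)
        | some b => if h < b.2 then some (prof, h) else best
      else best) b
    = (bucket.filterMap (pvElig hr cl)).foldl pvFMStep b := by
  induction bucket with
  | nil => intro b; simp
  | cons p t ih =>
    intro b
    rw [List.foldl_cons, List.filterMap_cons]
    by_cases h4 : 4 ≤ PySem.Dict.getD (PySem.Dict.getD hr p (PySem.Dict.mk [])) cl 0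
    · have he : pvElig hr cl p
          = some (p, PySem.Dict.getD (PySem.Dict.getD hr p (PySem.Dict.mk [])) cl 0) := by
        unfold pvElig; simp [h4]
      rw [he]
      simp only [h4, if_true, ih, List.foldl_cons]
      cases b <;> rfl
    · have he : pvElig hr cl p = none := by unfold pvElig; simp [h4]
      rw [he]
      simp only [h4, if_false, ih]

theorem pv_best_eq (hr : PvHR) (bucket : List String) (cl : String) :
    pvBest hr bucket cl = pvFirstMin (bucket.filterMap (pvElig hr cl)) := by
  unfold pvBest pvFirstMin
  exact pv_best_aux hr cl bucket none

theorem pv_firstMin_mem_aux (l : List (String × Int)) :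
    ∀ (b : Option (String × Int)) (x : String × Int),
      l.foldl pvFMStep b = some x → x ∈ l ∨ b = some x := by
  induction l with
  | nil => intro b x h; right; exact h
  | cons y t ih =>
    intro b x h
    rw [List.foldl_cons] at h
    rcases ih (pvFMStep b y) x h with hm | hb
    · exact Or.inl (List.mem_cons_of_mem _ hm)
    · cases b with
      | none =>
        simp only [pvFMStep, Option.some_inj] at hb
        subst hb
        exact Or.inl List.mem_cons_self
      | some z =>
        simp only [pvFMStep] at hb
        split at hb
        · obtain rfl : y = x := Option.some_inj.mp hb
          exact Or.inl List.mem_cons_self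
        · exact Or.inr hb

theorem pv_best_some (hr : PvHR) (bucket : List String) (cl choisi : String) (h : Int)
    (hb : pvBest hr bucket cl = some (choisi, h)) :
    choisi ∈ bucket ∧ h = PySem.Dict.getD (PySem.Dict.getD hr choisi (PySem.Dict.mk [])) cl 0 := by
  rw [pv_best_eq] at hb
  rcases pv_firstMin_mem_aux _ none _ hb with hm | hnone
  · rcases List.mem_filterMap.mp hm with ⟨p, hp, he⟩
    have := pv_elig_eq_some hr cl p _ he
    have h1 : choisi = p := congrArg Prod.fst this
    subst h1
    exact ⟨hp, congrArg Prod.snd this⟩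
  · exact absurd hnone (by simp)

theorem pv_sorted_head (l : List (String × Int)) :
    (PySem.List.sorted l (fun x => x.2) false).head? = pvFirstMin l := by
  have hdef : ∀ ls : List (String × Int),
      PySem.List.sorted ls (fun x => x.2) false
        = ls.foldl (fun acc x => PySem.List.insertBy (fun a b => decide (a.2 < b.2)) x acc) [] :=
    fun ls => rfl
  unfold pvFirstMin
  induction l using List.reverseRecOn with
  | nil => simp [hdef]
  | append_singleton t x ih =>
    rw [hdef, List.foldl_append, List.foldl_cons, List.foldl_nil, ← hdef,
        List.foldl_append, List.foldl_cons, List.foldl_nil]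
    cases hs : PySem.List.sorted t (fun x => x.2) false with
    | nil =>
      rw [hs] at ih
      simp only [List.head?_nil] at ih
      rw [← ih]
      simp [PySem.List.insertBy, pvFMStep]
    | cons y ys =>
      rw [hs] at ih
      simp only [List.head?_cons] at ih
      rw [← ih]
      by_cases hlt : x.2 < y.2
      · simp [PySem.List.insertBy, pvFMStep, hlt]
      · simp [PySem.List.insertBy, pvFMStep, hlt]

theorem pv_idx_ms (p d0 : String) (ms : List String) :
    ∀ (idx : PvIdx) (d m : String), ms.Nodup →
    PySem.Dict.getD
      (ms.foldl (fun idx m' => idx.insert (d0, m') (PySem.Dict.getD idx (d0, m') [] ++ [p])) idx)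
      (d, m) []
    = PySem.Dict.getD idx (d, m) [] ++ (if d = d0 ∧ m ∈ ms then [p] else []) := by
  induction ms with
  | nil => intro idx d m _; simp
  | cons m0 t ih =>
    intro idx d m hnd
    rw [List.foldl_cons, ih _ d m (List.nodup_cons.mp hnd).2]
    by_cases hdm : (d, m) = (d0, m0)
    · have hd : d = d0 := congrArg Prod.fst hdm
      have hm : m = m0 := congrArg Prod.snd hdm
      subst hd; subst hm
      rw [PySem.Dict.getD_insert_self]
      have hmt : m ∉ t := (List.nodup_cons.mp hnd).1
      simp [hmt]
    · rw [PySem.Dict.getD_insert_of_ne _ _ _ hdm]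
      congr 1
      by_cases hd : d = d0
      · subst hd
        have hm0 : m ≠ m0 := fun hm => hdm (by rw [hm])
        simp [hm0]
      · simp [hd]

theorem pv_idx_jours (p : String) (jours : List (String × List String)) :
    ∀ (idx : PvIdx) (d m : String),
    (jours.map Prod.fst).Nodup → (∀ dm ∈ jours, dm.2.Nodup) →
    PySem.Dict.getD
      (jours.foldl (fun idx dm =>
        dm.2.foldl (fun idx m' => idx.insert (dm.1, m') (PySem.Dict.getD idx (dm.1, m') [] ++ [p])) idx) idx)
      (d, m) []
    = PySem.Dict.getD idx (d, m) []
      ++ (if PySem.Set.contains (PySem.Dict.getD (PySem.Dict.mk jours) d PySem.Set.empty) m then [p] else []) := by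
  induction jours with
  | nil =>
    intro idx d m _ _
    simp [PySem.Dict.getD, PySem.Dict.get?, PySem.Set.contains]
  | cons dm0 t ih =>
    intro idx d m hk hv
    have hk2 := hk
    simp only [List.map_cons, List.nodup_cons] at hk2
    have hkt : (t.map Prod.fst).Nodup := hk2.2
    have hd0t : dm0.1 ∉ t.map Prod.fst := hk2.1
    rw [List.foldl_cons,
        ih _ d m hkt (fun q hq => hv q (List.mem_cons_of_mem _ hq)),
        pv_idx_ms p dm0.1 dm0.2 idx d m (hv dm0 List.mem_cons_self), List.append_assoc]
    congr 1
    have hget : PySem.Dict.getD (PySem.Dict.mk (dm0 :: t)) d PySem.Set.empty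
        = if dm0.1 == d then dm0.2 else PySem.Dict.getD (PySem.Dict.mk t) d PySem.Set.empty := by
      rw [PySem.Dict.getD_eq_get?_getD, PySem.Dict.get?_mk_cons]
      by_cases hb : dm0.1 == d
      · simp [hb]
      · simp [hb, PySem.Dict.getD_eq_get?_getD]
    by_cases hd : d = dm0.1
    · have hbt : (dm0.1 == d) = true := by simp [hd]
      have hnotin : d ∉ (PySem.Dict.mk t).keys := by
        simpa [PySem.Dict.keys, hd] using hd0t
      have hnone : (PySem.Dict.mk t).get? d = none :=
        (PySem.Dict.get?_eq_none_iff_not_mem_keys _ _).mpr hnotin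
      rw [hget, hbt, if_pos rfl, PySem.Dict.getD_eq_get?_getD, hnone]
      simp [hd, PySem.Set.contains, PySem.Set.empty]
    · have hb : (dm0.1 == d) = false := by
        simp only [beq_eq_false_iff_ne, ne_eq]
        exact fun hx => hd hx.symm
      rw [hget, hb]
      simp [hd]

theorem pv_idx_outer (dispos : List (String × List (String × List String))) :
    ∀ (idx : PvIdx) (d m : String),
    (∀ pd ∈ dispos, (pd.2.map Prod.fst).Nodup ∧ ∀ dm ∈ pd.2, dm.2.Nodup) →
    PySem.Dict.getD
      (dispos.foldl (fun idx pd =>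
        pd.2.foldl (fun idx dm =>
          dm.2.foldl (fun idx m' => idx.insert (dm.1, m') (PySem.Dict.getD idx (dm.1, m') [] ++ [pd.1])) idx) idx) idx)
      (d, m) []
    = PySem.Dict.getD idx (d, m) []
      ++ pvAvail (PySem.Dict.mk (dispos.map (fun pd => (pd.1, PySem.Dict.mk pd.2)))) d m := by
  induction dispos with
  | nil => intro idx d m _; simp [pvAvail, pvAvailL]
  | cons pd t ih =>
    intro idx d m hin
    rw [List.foldl_cons,
        ih _ d m (fun q hq => hin q (List.mem_cons_of_mem _ hq)),
        pv_idx_jours pd.1 pd.2 idx d m (hin pd List.mem_cons_self).1 (hin pd List.mem_cons_self).2,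
        List.append_assoc]
    congr 1
    simp only [pvAvail, pvAvailL, List.map_cons, List.filter_cons, pvCondP]
    by_cases hc : PySem.Set.contains (PySem.Dict.getD (PySem.Dict.mk pd.2) d PySem.Set.empty) m = true
    · rw [if_pos hc, if_pos hc, List.map_cons, List.singleton_append]
    · rw [if_neg hc, if_neg hc, List.nil_append]

theorem pv_buildIdx_getD (dispos : List (String × List (String × List String)))
    (hin : ∀ pd ∈ dispos, (pd.2.map Prod.fst).Nodup ∧ ∀ dm ∈ pd.2, dm.2.Nodup) (d m : String) :
    PySem.Dict.getD (pvBuildIdx dispos) (d, m) [] =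
      pvAvail (PySem.Dict.mk (dispos.map (fun pd => (pd.1, PySem.Dict.mk pd.2)))) d m := by
  unfold pvBuildIdx
  rw [pv_idx_outer dispos (PySem.Dict.mk []) d m hin]
  simp [PySem.Dict.getD, PySem.Dict.get?]

theorem pv_keys_insert_of_contains {κ ν : Type} [BEq κ] [LawfulBEq κ]
    (d : PySem.Dict κ ν) (k : κ) (v : ν) (hc : d.contains k = true) :
    (d.insert k v).items.map Prod.fst = d.items.map Prod.fst := by
  rw [PySem.Dict.items_insert_of_contains _ _ hc, List.map_map]
  apply List.map_congr_left
  intro p _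
  simp only [Function.comp_apply]
  split
  · next hb => exact (eq_of_beq hb).symm
  · rfl

theorem pv_nodup_keys_insert {κ ν : Type} [BEq κ] [LawfulBEq κ]
    (d : PySem.Dict κ ν) (k : κ) (v : ν)
    (h : (d.items.map Prod.fst).Nodup) : ((d.insert k v).items.map Prod.fst).Nodup := by
  cases hc : d.contains k with
  | true => rw [pv_keys_insert_of_contains d k v hc]; exact h
  | false =>
    rw [PySem.Dict.items_insert_of_not_contains _ _ hc, List.map_append]
    have hnm : k ∉ d.items.map Prod.fst := by
      intro hkm
      have hg : d.get? k = none := by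
        have := PySem.Dict.contains_eq_isSome_get? d k
        rw [hc] at this
        exact Option.not_isSome_iff_eq_none.mp (by rw [← this]; simp)
      have : k ∉ d.keys := (PySem.Dict.get?_eq_none_iff_not_mem_keys d k).mp hg
      exact this (by simpa [PySem.Dict.keys] using hkm)
    simp only [List.map_cons, List.map_nil]
    rw [List.nodup_append]
    refine ⟨h, List.nodup_singleton _, ?_⟩
    intro a ha b hb
    have hbk : b = k := by simpa using hb
    subst hbk
    intro hak
    exact hnm (hak ▸ ha)

theorem pv_contains_discard_self (s : PySem.Set String) (m : String) :
    PySem.Set.contains (PySem.Set.discard s m) m = false := by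
  simp [PySem.Set.discard, PySem.Set.contains]

theorem pv_contains_discard_of_ne (s : PySem.Set String) (m m' : String) (hne : m' ≠ m) :
    PySem.Set.contains (PySem.Set.discard s m) m' = PySem.Set.contains s m' := by
  simp [PySem.Set.discard, PySem.Set.contains, hne]

theorem pv_availL_replace_same (choisi : String) (v dd : PySem.Dict String (PySem.Set String))
    (d m : String) (items : List (String × PySem.Dict String (PySem.Set String))) :
    (items.map Prod.fst).Nodup → (choisi, dd) ∈ items →
    pvCondP d m (choisi, v) = pvCondP d m (choisi, dd) →
    pvAvailL (items.map (fun p => if p.1 == choisi then (choisi, v) else p)) d m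
      = pvAvailL items d m := by
  induction items with
  | nil => intro _ hmem _; cases hmem
  | cons p t ih =>
    intro hk hmem hcond
    simp only [List.map_cons, List.nodup_cons] at hk
    by_cases hp : p.1 = choisi
    · have hpd : p = (choisi, dd) := by
        rcases List.mem_cons.mp hmem with hh | hht
        · exact hh.symm
        · exact absurd (hp ▸ List.mem_map_of_mem (f := Prod.fst) hht) (by simpa [hp] using hk.1)
      have hrt : t.map (fun p => if p.1 == choisi then (choisi, v) else p) = t := by
        refine (List.map_congr_left (g := id) ?_).trans (List.map_id t)
        intro q hq
        have : q.1 ≠ choisi := fun hx => (hp ▸ hk.1) (hx ▸ List.mem_map_of_mem (f := Prod.fst) hq)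
        simp [this]
      rw [List.map_cons, hrt]
      subst hpd
      simp only [BEq.rfl, if_true]
      unfold pvAvailL
      rw [List.filter_cons, List.filter_cons, hcond]
      by_cases hcd : pvCondP d m (choisi, dd) = true
      · rw [if_pos hcd, if_pos hcd]; rfl
      · rw [if_neg hcd, if_neg hcd]
    · have hb : (p.1 == choisi) = false := by simpa using hp
      have hmt : (choisi, dd) ∈ t := by
        rcases List.mem_cons.mp hmem with hh | hht
        · exact absurd (congrArg Prod.fst hh.symm) hp
        · exact hht
      rw [List.map_cons, hb]
      simp only [if_false, Bool.false_eq_true]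
      unfold pvAvailL
      rw [List.filter_cons, List.filter_cons]
      have ih' := ih hk.2 hmt hcond
      by_cases hcp : pvCondP d m p = true
      · rw [if_pos hcp, if_pos hcp, List.map_cons, List.map_cons]
        unfold pvAvailL at ih'
        rw [ih']
      · rw [if_neg hcp, if_neg hcp]
        exact ih'

theorem pv_availL_replace_erase (choisi : String) (v dd : PySem.Dict String (PySem.Set String))
    (d m : String) (items : List (String × PySem.Dict String (PySem.Set String))) :
    (items.map Prod.fst).Nodup → (choisi, dd) ∈ items →
    pvCondP d m (choisi, dd) = true → pvCondP d m (choisi, v) = false →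
    pvAvailL (items.map (fun p => if p.1 == choisi then (choisi, v) else p)) d m
      = (pvAvailL items d m).erase choisi := by
  induction items with
  | nil => intro _ hmem _ _; cases hmem
  | cons p t ih =>
    intro hk hmem ht hf
    simp only [List.map_cons, List.nodup_cons] at hk
    by_cases hp : p.1 = choisi
    · have hpd : p = (choisi, dd) := by
        rcases List.mem_cons.mp hmem with hh | hht
        · exact hh.symm
        · exact absurd (hp ▸ List.mem_map_of_mem (f := Prod.fst) hht) (by simpa [hp] using hk.1)
      have hrt : t.map (fun p => if p.1 == choisi then (choisi, v) else p) = t := by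
        refine (List.map_congr_left (g := id) ?_).trans (List.map_id t)
        intro q hq
        have : q.1 ≠ choisi := fun hx => (hp ▸ hk.1) (hx ▸ List.mem_map_of_mem (f := Prod.fst) hq)
        simp [this]
      rw [List.map_cons, hrt]
      subst hpd
      simp only [BEq.rfl, if_true]
      unfold pvAvailL
      rw [List.filter_cons, List.filter_cons, if_neg (by simp [hf]), if_pos ht,
          List.map_cons, List.erase_cons_head]
    · have hb : (p.1 == choisi) = false := by simpa using hp
      have hmt : (choisi, dd) ∈ t := by
        rcases List.mem_cons.mp hmem with hh | hht
        · exact absurd (congrArg Prod.fst hh.symm) hp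
        · exact hht
      rw [List.map_cons, hb]
      simp only [if_false, Bool.false_eq_true]
      unfold pvAvailL
      rw [List.filter_cons, List.filter_cons]
      have ih' := ih hk.2 hmt ht hf
      unfold pvAvailL at ih'
      by_cases hcp : pvCondP d m p = true
      · rw [if_pos hcp, if_pos hcp, List.map_cons, List.map_cons, ih',
            List.erase_cons_tail]
        simp [hp]
      · rw [if_neg hcp, if_neg hcp]
        exact ih'

theorem pv_avail_mem_entry (dp : PvDP) (d m choisi : String)
    (hmem : choisi ∈ pvAvail dp d m) :
    ∃ dd, (choisi, dd) ∈ dp.items ∧ pvCondP d m (choisi, dd) = true := by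
  unfold pvAvail pvAvailL at hmem
  rcases List.mem_map.mp hmem with ⟨p, hp, hfst⟩
  obtain ⟨p1, p2⟩ := p
  rcases List.mem_filter.mp hp with ⟨hpi, hpc⟩
  obtain rfl : p1 = choisi := hfst
  exact ⟨p2, hpi, hpc⟩

theorem pv_loop_eq (cs : List PvCourse) (dp : PvDP) (idx : PvIdx) (hr : PvHR) (aff : PvAff)
    (hk : (dp.items.map Prod.fst).Nodup)
    (hin : ∀ pd ∈ dp.items, (pd.2.items.map Prod.fst).Nodup ∧ ∀ dm ∈ pd.2.items, dm.2.Nodup)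
    (hInv : ∀ d m, PySem.Dict.getD idx (d, m) [] = pvAvail dp d m) :
    (cs.foldl pvStepA (dp, hr, aff)).2.2 = (cs.foldl pvStepB (idx, hr, aff)).2.2 := by
  induction cs generalizing dp idx hr aff with
  | nil => rfl
  | cons c t ih =>
    rw [List.foldl_cons, List.foldl_cons]
    have hhead : (PySem.List.sorted (pvCandidats hr dp c.1 c.2.1 c.2.2.1) (fun x => x.2) false).head?
        = pvBest hr (PySem.Dict.getD idx (c.1, c.2.1) []) c.2.2.1 := by
      rw [pv_sorted_head, pv_cand_eq, pv_best_eq, hInv]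
    cases hb : pvBest hr (PySem.Dict.getD idx (c.1, c.2.1) []) c.2.2.1 with
    | none =>
      have hsort : PySem.List.sorted (pvCandidats hr dp c.1 c.2.1 c.2.2.1) (fun x => x.2) false = [] := by
        rw [hb] at hhead
        exact List.head?_eq_none_iff.mp hhead
      have hA : pvStepA (dp, hr, aff) c = (dp, hr, aff) := by
        simp only [pvStepA, hsort]
      have hB : pvStepB (idx, hr, aff) c = (idx, hr, aff) := by
        simp only [pvStepB, hb]
      rw [hA, hB]
      exact ih dp idx hr aff hk hin hInv
    | some pr =>
      obtain ⟨choisi, h⟩ := pr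
      have hsomehead : (PySem.List.sorted (pvCandidats hr dp c.1 c.2.1 c.2.2.1) (fun x => x.2) false).head?
          = some (choisi, h) := by rw [hhead, hb]
      obtain ⟨ys, hsort⟩ : ∃ ys,
          PySem.List.sorted (pvCandidats hr dp c.1 c.2.1 c.2.2.1) (fun x => x.2) false = (choisi, h) :: ys := by
        cases hsl : PySem.List.sorted (pvCandidats hr dp c.1 c.2.1 c.2.2.1) (fun x => x.2) false with
        | nil => rw [hsl] at hsomehead; exact absurd hsomehead (by simp)
        | cons a ys =>
          rw [hsl] at hsomehead
          simp only [List.head?_cons, Option.some_inj] at hsomehead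
          exact ⟨ys, by rw [hsomehead]⟩
      obtain ⟨hmem_b, hh⟩ := pv_best_some hr _ _ _ _ hb
      have hmem : choisi ∈ pvAvail dp c.1 c.2.1 := by rw [hInv] at hmem_b; exact hmem_b
      obtain ⟨dd, hmem_items, hcondt⟩ := pv_avail_mem_entry dp c.1 c.2.1 choisi hmem
      have hkeys : dp.keys.Nodup := by simpa [PySem.Dict.keys] using hk
      have hgetdd : PySem.Dict.getD dp choisi (PySem.Dict.mk []) = dd :=
        PySem.Dict.getD_of_mem_items dp hmem_items hkeys _
      have hcont : dp.contains choisi = true := by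
        rw [PySem.Dict.contains_eq_isSome_get?,
            (PySem.Dict.get?_eq_some_iff_mem_items dp choisi dd hkeys).mpr hmem_items]
        rfl
      -- the modified availability dict and its properties
      obtain ⟨v, hv⟩ : ∃ v : PySem.Dict String (PySem.Set String),
          v = dd.modify c.1 PySem.Set.empty (fun s => PySem.Set.discard s c.2.1) := ⟨_, rfl⟩
      have hdp' : dp.modify choisi (PySem.Dict.mk [])
          (fun dd => dd.modify c.1 PySem.Set.empty (fun s => PySem.Set.discard s c.2.1))
          = dp.insert choisi v := by
        rw [hv]
        simp only [PySem.Dict.modify, hgetdd]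
      have hitems' : (dp.insert choisi v).items
          = dp.items.map (fun p => if p.1 == choisi then (choisi, v) else p) :=
        PySem.Dict.items_insert_of_contains _ _ hcont
      have hcondvf : pvCondP c.1 c.2.1 (choisi, v) = false := by
        unfold pvCondP
        show PySem.Set.contains (v.getD c.1 PySem.Set.empty) c.2.1 = false
        rw [hv, PySem.Dict.getD_modify_self]
        exact pv_contains_discard_self _ _
      have hcondsame : ∀ d m, (d, m) ≠ (c.1, c.2.1) →
          pvCondP d m (choisi, v) = pvCondP d m (choisi, dd) := by
        intro d m hne
        unfold pvCondP
        show PySem.Set.contains (v.getD d PySem.Set.empty) m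
            = PySem.Set.contains (dd.getD d PySem.Set.empty) m
        by_cases hd : d = c.1
        · subst hd
          have hm : m ≠ c.2.1 := fun hx => hne (by rw [hx])
          rw [hv, PySem.Dict.getD_modify_self]
          exact pv_contains_discard_of_ne _ _ _ hm
        · rw [hv, PySem.Dict.getD_modify_of_ne _ _ _ hd]
      -- new invariants
      have hk' : ((dp.insert choisi v).items.map Prod.fst).Nodup :=
        pv_nodup_keys_insert dp choisi v hk
      have hin' : ∀ pd ∈ (dp.insert choisi v).items,
          (pd.2.items.map Prod.fst).Nodup ∧ ∀ dm ∈ pd.2.items, dm.2.Nodup := by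
        intro pd hpd
        rcases (PySem.Dict.mem_items_insert dp choisi v pd).mp hpd with rfl | ⟨hpdi, _⟩
        · constructor
          · rw [hv]
            unfold PySem.Dict.modify
            exact pv_nodup_keys_insert dd c.1 _ (hin (choisi, dd) hmem_items).1
          · intro dm hdm
            rw [hv] at hdm
            unfold PySem.Dict.modify at hdm
            rcases (PySem.Dict.mem_items_insert dd c.1 _ dm).mp hdm with rfl | ⟨hdmi, _⟩
            · apply List.Nodup.filter
              rw [PySem.Dict.getD_eq_get?_getD]
              cases hg : dd.get? c.1 with
              | none => exact List.nodup_nil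
              | some s =>
                exact (hin (choisi, dd) hmem_items).2 (c.1, s)
                  (PySem.Dict.mem_items_of_get?_eq_some dd hg)
            · exact (hin (choisi, dd) hmem_items).2 dm hdmi
        · exact hin pd hpdi
      have hInv' : ∀ d m,
          PySem.Dict.getD (idx.insert (c.1, c.2.1) ((PySem.Dict.getD idx (c.1, c.2.1) []).erase choisi)) (d, m) []
            = pvAvail (dp.insert choisi v) d m := by
        intro d m
        by_cases hdm : (d, m) = (c.1, c.2.1)
        · have hd : d = c.1 := congrArg Prod.fst hdm
          have hm : m = c.2.1 := congrArg Prod.snd hdm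
          subst hd; subst hm
          rw [PySem.Dict.getD_insert_self, hInv]
          unfold pvAvail
          rw [hitems']
          exact (pv_availL_replace_erase choisi v dd c.1 c.2.1 dp.items hk hmem_items hcondt hcondvf).symm
        · rw [PySem.Dict.getD_insert_of_ne _ _ _ hdm, hInv]
          unfold pvAvail
          rw [hitems']
          exact (pv_availL_replace_same choisi v dd d m dp.items hk hmem_items (hcondsame d m hdm)).symm
      -- evaluate the two steps
      have hA : pvStepA (dp, hr, aff) c =
          (dp.insert choisi v,
           hr.modify choisi (PySem.Dict.mk []) (fun m => m.modify c.2.2.1 0 (fun h => h - 4)),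
           aff.modify choisi [] (fun l => l ++ [c])) := by
        simp only [pvStepA, hsort]
        rw [hdp']
      have hhr : hr.modify choisi (PySem.Dict.mk []) (fun m => m.modify c.2.2.1 0 (fun h => h - 4))
          = hr.modify choisi (PySem.Dict.mk []) (fun m => m.insert c.2.2.1 (h - 4)) := by
        unfold PySem.Dict.modify
        rw [hh]
      have hB : pvStepB (idx, hr, aff) c =
          (idx.insert (c.1, c.2.1) ((PySem.Dict.getD idx (c.1, c.2.1) []).erase choisi),
           hr.modify choisi (PySem.Dict.mk []) (fun m => m.insert c.2.2.1 (h - 4)),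
           aff.modify choisi [] (fun l => l ++ [c])) := by
        simp only [pvStepB, hb]
      rw [hA, hB, hhr]
      exact ih _ _ _ _ hk' hin' hInv'

-- ===== VERDICT (by name: the statement is the Claim_ definition above) =====
theorem attribuer_cours_spec : Claim_equal_attribuer_cours := by
  intro cours dispos heures_init _hdom hpre
  unfold Spec_attribuer_cours attribuer_cours attribuer_cours_alt
  obtain ⟨h1, h2, _⟩ := hpre
  refine congrArg PySem.Dict.items (pv_loop_eq cours _ _ _ _ ?_ ?_ ?_)
  · simpa [Function.comp] using h1
  · intro pd hpd
    obtain ⟨q, hq, rfl⟩ := List.mem_map.mp hpd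
    exact h2 q hq
  · intro d m
    exact pv_buildIdx_getD dispos h2 d m
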